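-- pv_equiv track=rewrite | github.com/HalfPunch/yandex-algoritm-training-6-homework | homework-2/E-deleting-meridians.py | sorted_array_to_meridian_array
-- ===== SOURCE A (Python) =====
-- def sorted_array_to_meridian_array(sorted_arr: [int], arr_len: int) -> [int]:
--     meridian_arr = []
--     if arr_len % 2 != 0:
--         meridian_arr.append(sorted_arr[arr_len // 2])
--         l_pointer, r_pointer = arr_len // 2 - 1, arr_len // 2 + 1
--     else:
--         l_pointer, r_pointer = arr_len // 2 - 1, arr_len // 2
--     while r_pointer != arr_len:
--         meridian_arr.append(sorted_arr[l_pointer])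
--         meridian_arr.append(sorted_arr[r_pointer])
--         l_pointer -= 1
--         r_pointer += 1
--     return meridian_arr
-- ===== SOURCE B (Python) =====
-- def sorted_array_to_meridian_array(sorted_arr: [int], arr_len: int) -> [int]:
--     # Closed-form index map: output slot t takes its element directly from the
--     # computed source index, no pointers, no interleaving of built halves.
--     mid = arr_len // 2
--     if arr_len % 2 != 0:
--         return [sorted_arr[mid - (t + 1) // 2 if t % 2 != 0 else mid + t // 2]
--                 for t in range(arr_len)]
--     return [sorted_arr[mid - 1 - t // 2 if t % 2 == 0 else mid + (t - 1) // 2]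
--             for t in range(arr_len)]
-- ===== Notes on version B (the rewrite author's own statement) =====
-- stated objective: alternative
-- what changed: Replaces A's stateful outward two-pointer while-loop with a stateless closed-form position-to-source index formula: one comprehension over output slots t computes the source index arithmetically from t and the middle.
import Mathlib
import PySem

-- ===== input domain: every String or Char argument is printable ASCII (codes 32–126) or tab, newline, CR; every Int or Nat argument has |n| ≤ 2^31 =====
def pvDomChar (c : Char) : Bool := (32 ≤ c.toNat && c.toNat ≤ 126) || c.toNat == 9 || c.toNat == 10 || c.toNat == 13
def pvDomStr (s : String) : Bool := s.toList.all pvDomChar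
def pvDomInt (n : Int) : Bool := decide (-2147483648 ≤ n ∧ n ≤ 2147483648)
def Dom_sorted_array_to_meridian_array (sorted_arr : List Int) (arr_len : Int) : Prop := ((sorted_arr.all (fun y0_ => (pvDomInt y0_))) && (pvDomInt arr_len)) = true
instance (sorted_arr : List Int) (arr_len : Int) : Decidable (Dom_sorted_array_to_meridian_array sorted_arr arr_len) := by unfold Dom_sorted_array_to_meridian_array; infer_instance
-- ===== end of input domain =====

-- B replaces A's stateful outward two-pointer walk by a stateless closed-form
-- position-to-source index formula mapped over the output slots; same cost, different algorithmic idea.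
-- ===== PORT A =====
-- while r_pointer != arr_len: … ; fuel (arr_len - r_pointer).toNat is the exact trip count on Pre_
-- (Python indexing sorted_arr[i] is ported as PySem.List.pyGetD … 0; Pre_ excludes the IndexError inputs).
def pvMeridianLoop (arr : List Int) (len : Int) : Nat → Int → Int → List Int → List Int
  | 0, _, _, acc => acc
  | n+1, l, r, acc =>
    if r = len then acc
    else pvMeridianLoop arr len n (l-1) (r+1)
          (acc ++ [PySem.List.pyGetD arr l 0, PySem.List.pyGetD arr r 0])

def sorted_array_to_meridian_array (sorted_arr : List Int) (arr_len : Int) : List Int :=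
  if PySem.Int.mod arr_len 2 ≠ 0 then
    pvMeridianLoop sorted_arr arr_len ((arr_len - (PySem.Int.floordiv arr_len 2 + 1)).toNat)
      (PySem.Int.floordiv arr_len 2 - 1) (PySem.Int.floordiv arr_len 2 + 1)
      [PySem.List.pyGetD sorted_arr (PySem.Int.floordiv arr_len 2) 0]
  else
    pvMeridianLoop sorted_arr arr_len ((arr_len - PySem.Int.floordiv arr_len 2).toNat)
      (PySem.Int.floordiv arr_len 2 - 1) (PySem.Int.floordiv arr_len 2) []

-- ===== PORT B =====
-- Source B's closed-form index map: one comprehension over output slots t; mid (= arr_len // 2) is inlined.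
def sorted_array_to_meridian_array_alt (sorted_arr : List Int) (arr_len : Int) : List Int :=
  if PySem.Int.mod arr_len 2 ≠ 0 then
    (PySem.List.pyRange 0 arr_len 1).map (fun t =>
      PySem.List.pyGetD sorted_arr
        (if PySem.Int.mod t 2 ≠ 0 then PySem.Int.floordiv arr_len 2 - PySem.Int.floordiv (t + 1) 2
         else PySem.Int.floordiv arr_len 2 + PySem.Int.floordiv t 2) 0)
  else
    (PySem.List.pyRange 0 arr_len 1).map (fun t =>
      PySem.List.pyGetD sorted_arr
        (if PySem.Int.mod t 2 = 0 then PySem.Int.floordiv arr_len 2 - 1 - PySem.Int.floordiv t 2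
         else PySem.Int.floordiv arr_len 2 + PySem.Int.floordiv (t - 1) 2) 0)

-- ===== PRECONDITION & SPEC =====
-- Pre_ excludes exactly the inputs where Python A does not return normally: arr_len > len(sorted_arr)
-- raises IndexError, and arr_len < 0 runs the while loop past the end of the list (IndexError).
def Pre_sorted_array_to_meridian_array (sorted_arr : List Int) (arr_len : Int) : Prop :=
  0 ≤ arr_len ∧ arr_len ≤ sorted_arr.length
instance (sorted_arr : List Int) (arr_len : Int) : Decidable (Pre_sorted_array_to_meridian_array sorted_arr arr_len) := by unfold Pre_sorted_array_to_meridian_array; infer_instance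
def pvWitness_sorted_array_to_meridian_array : List Int × Int := ([1, 2, 3, 4, 5], 5)

def Spec_sorted_array_to_meridian_array (sorted_arr : List Int) (arr_len : Int) (out : List Int) : Prop := out = sorted_array_to_meridian_array_alt sorted_arr arr_len
instance (sorted_arr : List Int) (arr_len : Int) (out : List Int) : Decidable (Spec_sorted_array_to_meridian_array sorted_arr arr_len out) := by unfold Spec_sorted_array_to_meridian_array; infer_instance

-- ===== CLAIM (what is proved, stated in full; the proofs are below) =====
def Claim_equal_sorted_array_to_meridian_array : Prop := ∀ (sorted_arr : List Int) (arr_len : Int), Dom_sorted_array_to_meridian_array sorted_arr arr_len → Pre_sorted_array_to_meridian_array sorted_arr arr_len → Spec_sorted_array_to_meridian_array sorted_arr arr_len (sorted_array_to_meridian_array sorted_arr arr_len)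

-- ===== LEMMAS AND PROOFS =====
-- A's loop with exact fuel n, started at (l, r) with len = r + n, flattens to a flatMap over the steps.
lemma pvMeridianLoop_flat (arr : List Int) : ∀ (n : Nat) (l r : Int) (acc : List Int),
    pvMeridianLoop arr (r + n) n l r acc
      = acc ++ (List.range n).flatMap
          (fun (k : Nat) => [PySem.List.pyGetD arr (l - (k : Int)) 0, PySem.List.pyGetD arr (r + (k : Int)) 0]) := by
  intro n
  induction n with
  | zero => intro l r acc; simp [pvMeridianLoop]
  | succ n ih =>
    intro l r acc
    have hlen : r + ((n : Nat) + 1 : Nat) = (r + 1) + (n : Nat) := by push_cast; ring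
    simp only [pvMeridianLoop, hlen]
    rw [if_neg (by omega)]
    rw [ih (l - 1) (r + 1)]
    rw [List.range_succ_eq_map]
    simp only [List.flatMap_cons, List.flatMap_map, List.append_assoc]
    congr 2
    · simp
    · apply List.flatMap_congr
      intro k _
      have h1 : l - 1 - (k : Int) = l - ((k : Nat).succ : Int) := by push_cast; ring
      have h2 : r + 1 + (k : Int) = r + ((k : Nat).succ : Int) := by push_cast; ring
      simp [h1, h2]

-- A map over an even-length range pairs up into a flatMap of consecutive pairs.
lemma pvMapRangePairs (f : Nat → Int) : ∀ (m : Nat),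
    (List.range (2 * m)).map f
      = (List.range m).flatMap (fun k => [f (2 * k), f (2 * k + 1)]) := by
  intro m
  induction m with
  | zero => simp
  | succ m ih =>
    have h : 2 * (m + 1) = (2 * m + 1) + 1 := by ring
    rw [h, List.range_succ, List.map_append, List.range_succ, List.map_append, ih]
    rw [List.range_succ, List.flatMap_append]
    simp

-- A map over an odd-length range is its head followed by pairs.
lemma pvMapRangeOdd (f : Nat → Int) (m : Nat) :
    (List.range (2 * m + 1)).map f
      = f 0 :: (List.range m).flatMap (fun k => [f (2 * k + 1), f (2 * k + 2)]) := by
  rw [List.range_succ_eq_map, List.map_cons, List.map_map, pvMapRangePairs]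
  simp only [Function.comp_apply, Nat.succ_eq_add_one]

theorem sorted_array_to_meridian_array_spec : Claim_equal_sorted_array_to_meridian_array := by
  intro sorted_arr arr_len _ hpre
  obtain ⟨h0, h1⟩ := hpre
  unfold Spec_sorted_array_to_meridian_array
  unfold sorted_array_to_meridian_array sorted_array_to_meridian_array_alt
  simp only [PySem.Int.floordiv_eq_ediv_of_pos (by norm_num : (0:Int) < 2),
             PySem.Int.mod_eq_emod_of_pos (by norm_num : (0:Int) < 2)]
  rw [PySem.List.pyRange_one 0 arr_len]
  by_cases hpar : arr_len % 2 = 0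
  · -- even case: arr_len = 2 * M
    simp only [hpar, ne_eq, not_true_eq_false, if_false]
    have hn : (arr_len - 0).toNat = 2 * (arr_len / 2).toNat := by omega
    rw [hn, List.map_map, pvMapRangePairs]
    have hA := pvMeridianLoop_flat sorted_arr ((arr_len - arr_len / 2).toNat)
      (arr_len / 2 - 1) (arr_len / 2) []
    rw [show arr_len / 2 + (((arr_len - arr_len / 2).toNat : Nat) : Int) = arr_len by omega] at hA
    rw [show ((arr_len - arr_len / 2).toNat : Nat) = (arr_len / 2).toNat by omega] at hA ⊢
    rw [hA, List.nil_append]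
    apply List.flatMap_congr
    intro k _
    have e0 : (0 : Int) + ((2 * k : Nat) : Int) = 2 * (k : Int) := by push_cast; ring
    have e1 : (0 : Int) + ((2 * k + 1 : Nat) : Int) = 2 * (k : Int) + 1 := by push_cast; ring
    simp only [Function.comp, e0, e1]
    rw [if_pos (by omega), if_neg (by omega)]
    rw [show arr_len / 2 - 1 - 2 * (k : Int) / 2 = arr_len / 2 - 1 - (k : Int) by omega,
        show arr_len / 2 + (2 * (k : Int) + 1 - 1) / 2 = arr_len / 2 + (k : Int) by omega]
  · -- odd case: arr_len = 2 * M + 1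
    simp only [hpar, ne_eq, not_false_eq_true, if_true]
    have hn : (arr_len - 0).toNat = 2 * (arr_len / 2).toNat + 1 := by omega
    rw [hn, List.map_map, pvMapRangeOdd]
    have hA := pvMeridianLoop_flat sorted_arr ((arr_len - (arr_len / 2 + 1)).toNat)
      (arr_len / 2 - 1) (arr_len / 2 + 1) [PySem.List.pyGetD sorted_arr (arr_len / 2) 0]
    rw [show arr_len / 2 + 1 + (((arr_len - (arr_len / 2 + 1)).toNat : Nat) : Int) = arr_len by omega] at hA
    rw [show ((arr_len - (arr_len / 2 + 1)).toNat : Nat) = (arr_len / 2).toNat by omega] at hA ⊢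
    rw [hA, List.singleton_append]
    congr 1
    · -- head: slot 0 reads the middle element
      simp only [Function.comp]
      norm_num
    · apply List.flatMap_congr
      intro k _
      have e1 : (0 : Int) + ((2 * k + 1 : Nat) : Int) = 2 * (k : Int) + 1 := by push_cast; ring
      have e2 : (0 : Int) + ((2 * k + 2 : Nat) : Int) = 2 * (k : Int) + 2 := by push_cast; ring
      simp only [Function.comp, e1, e2]
      rw [if_pos (by omega), if_neg (by omega)]
      rw [show arr_len / 2 - (2 * (k : Int) + 1 + 1) / 2 = arr_len / 2 - 1 - (k : Int) by omega,
          show arr_len / 2 + (2 * (k : Int) + 2) / 2 = arr_len / 2 + 1 + (k : Int) by omega]
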